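-- pv_equiv track=rewrite | github.com/effoT/codingbat-py | String-3.py | mirrorEnds
-- ===== SOURCE A (Python) =====
-- def mirrorEnds(text):
--     def is_A_starting_in_B(a, b):
--         for i in range(len(b)):
--             if a == b[0:i + len(a)]:
--                 return True
--         return False
--     reverse_text = text[::-1]
--     max_counter = 0
--     max_text = ""
--     for o in range(len(text) + 1):
--         if is_A_starting_in_B(text[0:o], reverse_text) == True:
--             if max_counter < len(text[0:o]):
--                 max_counter = len(text[0:o])
--                 max_text = text[0:o]
--     return max_text
-- ===== SOURCE B (Python) =====
-- def mirrorEnds(text):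
--     out = []
--     for a, b in zip(text, reversed(text)):
--         if a != b:
--             break
--         out.append(a)
--     return ''.join(out)
-- ===== Notes on version B (the rewrite author's own statement) =====
-- stated objective: faster
-- what changed: Replaced the triple loop (all prefixes, each tested against the reversed string by a quadratic prefix-search with repeated slicing) by a single forward pass over zip(text, reversed(text)) that collects characters until the first mismatch.
import Mathlib
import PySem

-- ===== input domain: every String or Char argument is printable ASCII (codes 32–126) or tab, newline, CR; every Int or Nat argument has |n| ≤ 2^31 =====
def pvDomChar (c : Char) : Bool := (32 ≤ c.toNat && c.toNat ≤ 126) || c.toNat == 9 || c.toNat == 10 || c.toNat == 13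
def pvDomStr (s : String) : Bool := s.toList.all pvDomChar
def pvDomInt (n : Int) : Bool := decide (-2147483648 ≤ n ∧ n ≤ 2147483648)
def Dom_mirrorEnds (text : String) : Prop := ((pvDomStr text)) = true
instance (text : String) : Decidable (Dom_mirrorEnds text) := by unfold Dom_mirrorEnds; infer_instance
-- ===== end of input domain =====

-- B replaces A's cubic "try every prefix against the reversed string with a quadratic
-- prefix search" by one linear pass over zip(text, reversed(text)) up to the first mismatch.

-- ===== PORT A =====
-- helper is_A_starting_in_B(a, b): for i in range(len(b)): if a == b[0:i+len(a)]: return True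
def isAStartingInB (a b : List Char) : Bool :=
  (PySem.List.pyRange 0 (b.length : Int)).any fun i =>
    a == PySem.List.slice b (some 0) (some (i + (a.length : Int)))

def mirrorEnds (text : String) : String :=
  let l := text.toList
  -- text[::-1] is the reverse (PySem.List.slice?_none_none_neg_one)
  let rev := l.reverse
  let st := (PySem.List.pyRange 0 ((l.length : Int) + 1)).foldl
    (fun (st : Int × List Char) o =>
      if isAStartingInB (PySem.List.slice l (some 0) (some o)) rev == true then
        if st.1 < ((PySem.List.slice l (some 0) (some o)).length : Int) then
          (((PySem.List.slice l (some 0) (some o)).length : Int),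
            PySem.List.slice l (some 0) (some o))
        else st
      else st) (0, [])
  String.mk st.2

-- ===== PORT B =====
-- the loop "for a, b in zip(text, reversed(text)): if a != b: break; out.append(a)"
def mirrorScan : List (Char × Char) → List Char
  | (a, b) :: rest => if a ≠ b then [] else a :: mirrorScan rest
  | [] => []

def mirrorEnds_alt (text : String) : String :=
  String.mk (mirrorScan (text.toList.zip text.toList.reverse))

-- ===== PRECONDITION & SPEC =====
def Spec_mirrorEnds (text : String) (out : String) : Prop := out = mirrorEnds_alt text
instance (text : String) (out : String) : Decidable (Spec_mirrorEnds text out) := by unfold Spec_mirrorEnds; infer_instance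

-- ===== CLAIM (what is proved, stated in full; the proofs are below) =====
def Claim_equal_mirrorEnds : Prop := ∀ (text : String), Dom_mirrorEnds text → Spec_mirrorEnds text (mirrorEnds text)

-- ===== LEMMAS AND PROOFS =====

-- mirrorScan (as.zip bs) is a common prefix of as and bs, and the longest one.
lemma mirrorScan_prefix_left : ∀ (as bs : List Char), mirrorScan (as.zip bs) <+: as := by
  intro as
  induction as with
  | nil => intro bs; simp [mirrorScan]
  | cons a as ih =>
    intro bs
    cases bs with
    | nil => simp [mirrorScan]
    | cons b bs =>
      simp only [List.zip_cons_cons, mirrorScan]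
      split
      · exact List.nil_prefix
      · exact List.cons_prefix_cons.mpr ⟨rfl, ih bs⟩

lemma mirrorScan_prefix_right : ∀ (as bs : List Char), mirrorScan (as.zip bs) <+: bs := by
  intro as
  induction as with
  | nil => intro bs; simp [mirrorScan]
  | cons a as ih =>
    intro bs
    cases bs with
    | nil => simp [mirrorScan]
    | cons b bs =>
      simp only [List.zip_cons_cons, mirrorScan]
      split
      · exact List.nil_prefix
      · rename_i h
        exact List.cons_prefix_cons.mpr ⟨not_ne_iff.mp h, ih bs⟩

lemma mirrorScan_max : ∀ (xs as bs : List Char), xs <+: as → xs <+: bs →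
    xs <+: mirrorScan (as.zip bs) := by
  intro xs
  induction xs with
  | nil => intro as bs _ _; exact List.nil_prefix
  | cons x xs ih =>
    intro as bs ha hb
    cases as with
    | nil => exact absurd ha (by simp)
    | cons a as =>
      cases bs with
      | nil => exact absurd hb (by simp)
      | cons b bs =>
        obtain ⟨rfl, ha'⟩ := List.cons_prefix_cons.mp ha
        obtain ⟨hxb, hb'⟩ := List.cons_prefix_cons.mp hb
        subst hxb
        simp only [List.zip_cons_cons, mirrorScan, ne_eq, not_true_eq_false, if_false]
        exact List.cons_prefix_cons.mpr ⟨rfl, ih as bs ha' hb'⟩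

-- characterization of A's prefix test
lemma isAStartingInB_iff (a b : List Char) :
    isAStartingInB a b = true ↔ b ≠ [] ∧ a <+: b := by
  unfold isAStartingInB
  rw [PySem.List.pyRange_zero_nat, List.any_map]
  simp only [List.any_eq_true, List.mem_range, Function.comp]
  constructor
  · rintro ⟨k, hk, he⟩
    have hb : b ≠ [] := by intro h; subst h; simp at hk
    rw [PySem.List.slice_toNat b (by positivity) (by positivity)] at he
    refine ⟨hb, ?_⟩
    rw [beq_iff_eq.mp he]
    exact List.take_prefix _ _
  · rintro ⟨hb, hpre⟩
    refine ⟨0, List.length_pos_of_ne_nil hb, ?_⟩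
    rw [PySem.List.slice_toNat b le_rfl (by positivity)]
    have : (((0:Nat):Int) + (a.length:Int)).toNat - (0:Int).toNat = a.length := by
      push_cast; omega
    rw [this]
    simp only [beq_iff_eq]
    exact (List.prefix_iff_eq_take.mp hpre)

-- slices with constant lower bound 0 and a Nat upper bound are takes
lemma slice_take (l : List Char) (j : Nat) :
    PySem.List.slice l (some 0) (some (j : Int)) = l.take j := by
  rw [PySem.List.slice_toNat l le_rfl (by positivity)]
  simp

-- a prefix of l is also a prefix of l.reverse exactly up to the scan length of B
lemma take_prefix_iff (l : List Char) (o : Nat) (ho : o ≤ l.length) :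
    l.take o <+: l.reverse ↔ o ≤ (mirrorScan (l.zip l.reverse)).length := by
  constructor
  · intro h
    have hlen := (mirrorScan_max (l.take o) l l.reverse (List.take_prefix o l) h).length_le
    rwa [List.length_take, min_eq_left ho] at hlen
  · intro h
    have hcl : mirrorScan (l.zip l.reverse) <+: l := mirrorScan_prefix_left l l.reverse
    have hcr : mirrorScan (l.zip l.reverse) <+: l.reverse := mirrorScan_prefix_right l l.reverse
    have heq : l.take o = (mirrorScan (l.zip l.reverse)).take o := by
      conv_rhs => rw [List.prefix_iff_eq_take.mp hcl]
      rw [List.take_take, min_eq_left h]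
    rw [heq]
    exact (List.take_prefix o _).trans hcr

-- the loop invariant of A's fold
lemma foldA_inv (l : List Char) : ∀ (m : Nat), m ≤ l.length →
    ((List.range (m + 1)).foldl
      (fun (st : Int × List Char) (j : Nat) =>
          if isAStartingInB (PySem.List.slice l (some 0) (some (j : Int))) l.reverse == true then
            if st.1 < ((PySem.List.slice l (some 0) (some (j : Int))).length : Int) then
              (((PySem.List.slice l (some 0) (some (j : Int))).length : Int),
                PySem.List.slice l (some 0) (some (j : Int)))
            else st
          else st) (0, []))
    = (((min m (mirrorScan (l.zip l.reverse)).length : Nat) : Int),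
        l.take (min m (mirrorScan (l.zip l.reverse)).length)) := by
  intro m
  induction m with
  | zero =>
    intro _
    simp only [List.range_succ, List.range_zero, List.nil_append, List.foldl_cons,
      List.foldl_nil, slice_take]
    simp
  | succ m ih =>
    intro hm
    rw [List.range_succ, List.foldl_append, ih (Nat.le_of_succ_le hm)]
    simp only [List.foldl_cons, List.foldl_nil, slice_take]
    by_cases hk : m + 1 ≤ (mirrorScan (l.zip l.reverse)).length
    · have hp : isAStartingInB (l.take (m + 1)) l.reverse = true := by
        rw [isAStartingInB_iff]
        exact ⟨by simpa using List.ne_nil_of_length_pos (by omega),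
          (take_prefix_iff l (m + 1) hm).mpr hk⟩
      have hlen : (l.take (m + 1)).length = m + 1 := by
        rw [List.length_take]; omega
      have hmin : min m (mirrorScan (l.zip l.reverse)).length = m := by omega
      have hmin' : min (m + 1) (mirrorScan (l.zip l.reverse)).length = m + 1 := by omega
      rw [hp, hlen, hmin, hmin']
      simp only [beq_self_eq_true, if_true]
      rw [if_pos (by exact_mod_cast Nat.lt_succ_self m)]
    · have hp : isAStartingInB (l.take (m + 1)) l.reverse = false := by
        rw [Bool.eq_false_iff, Ne, isAStartingInB_iff]
        rintro ⟨-, hpre⟩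
        exact hk ((take_prefix_iff l (m + 1) hm).mp hpre)
      have hmin : min m (mirrorScan (l.zip l.reverse)).length
          = min (m + 1) (mirrorScan (l.zip l.reverse)).length := by omega
      rw [hp, hmin]
      simp

-- ===== VERDICT (by name: the statement is the Claim_ definition above) =====
theorem mirrorEnds_spec : Claim_equal_mirrorEnds := by
  intro text _
  show mirrorEnds text = mirrorEnds_alt text
  unfold mirrorEnds mirrorEnds_alt
  dsimp only
  have hrange : PySem.List.pyRange 0 ((text.toList.length : Int) + 1)
      = (List.range (text.toList.length + 1)).map (fun (k : Nat) => (k : Int)) := by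
    rw [show ((text.toList.length : Int) + 1) = ((text.toList.length + 1 : Nat) : Int) by
      push_cast; ring]
    exact PySem.List.pyRange_zero_nat _
  rw [hrange, List.foldl_map]
  rw [foldA_inv text.toList text.toList.length le_rfl]
  have hk : (mirrorScan (text.toList.zip text.toList.reverse)).length ≤ text.toList.length :=
    (mirrorScan_prefix_left text.toList text.toList.reverse).length_le
  rw [min_eq_right hk]
  congr 1
  exact (List.prefix_iff_eq_take.mp
    (mirrorScan_prefix_left text.toList text.toList.reverse)).symm
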